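-- pv_equiv track=rewrite | github.com/gaellericher/advent-of-code-2022 | day_1_python/main.py | make_bags
-- ===== SOURCE A (Python) =====
-- def make_bags(lines):
--     res, bag = [], []
--     for item in lines:
--         if item == '' or item == '\n':
--             res.append(bag)
--             bag = []
--         else:
--             bag.append(int(item))
--     return res
-- ===== SOURCE B (Python) =====
-- def make_bags(lines):
--     vals = [None if x == '' or x == '\n' else int(x) for x in lines]
--     bags = []
--     start = 0
--     for k, v in enumerate(vals):
--         if v is None:
--             bags.append(vals[start:k])
--             start = k + 1
--     return bags
-- ===== Notes on version B (the rewrite author's own statement) =====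
-- stated objective: alternative
-- what changed: B first parses every line into a list of ints (None marking blank separators) in one comprehension and then splits that list at the separator positions by slicing, instead of A's single loop threading a current-bag accumulator; the segment after the last separator is naturally never appended.
import Mathlib
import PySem

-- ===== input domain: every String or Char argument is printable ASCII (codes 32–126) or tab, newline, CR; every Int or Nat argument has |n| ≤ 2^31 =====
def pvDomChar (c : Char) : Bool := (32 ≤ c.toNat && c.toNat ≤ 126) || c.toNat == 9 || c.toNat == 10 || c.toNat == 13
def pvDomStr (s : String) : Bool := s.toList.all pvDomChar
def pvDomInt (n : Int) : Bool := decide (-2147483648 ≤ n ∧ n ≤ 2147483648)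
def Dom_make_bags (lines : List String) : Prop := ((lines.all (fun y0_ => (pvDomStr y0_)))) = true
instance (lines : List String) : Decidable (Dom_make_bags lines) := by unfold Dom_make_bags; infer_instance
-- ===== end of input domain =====

-- B parses every line upfront into a list of ints (None at blank separators) and then splits that
-- list at the separator positions by slicing, instead of A's single loop threading a current-bag
-- accumulator (alternative decomposition, not faster).

-- `item == '' or item == '\n'` (shared by both ports)
def pvBlank (s : String) : Bool := s == "" || s == "\n"

-- `int(item)`; Pre_make_bags guarantees the parse succeeds, so the default is never reached there
def pvToInt (s : String) : Int := (PySem.Int.ofStr? s).getD 0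

-- ===== PORT A =====
def pvGoA : List String → List (List Int) → List Int → List (List Int)
  | [], res, _bag => res
  | x :: t, res, bag =>
      if pvBlank x then pvGoA t (res ++ [bag]) []
      else pvGoA t res (bag ++ [pvToInt x])

def make_bags (lines : List String) : List (List Int) := pvGoA lines [] []

-- ===== PORT B =====
-- `None if x == '' or x == '\n' else int(x)`
def pvConv (s : String) : Option Int := if pvBlank s then none else some (pvToInt s)

-- the body of Source B's `for k, v in enumerate(vals)` loop; state = (bags, start).
-- `vals[start:k]` slices between two separator positions, so it contains no `none`:
-- `.filterMap id` is the typed extraction of its int entries.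
def pvStepB (vals : List (Option Int)) (acc : List (List Int) × Int) (kv : Int × Option Int) :
    List (List Int) × Int :=
  match kv.2 with
  | none => (acc.1 ++ [(PySem.List.slice vals (some acc.2) (some kv.1)).filterMap id], kv.1 + 1)
  | some _ => acc

def make_bags_alt (lines : List String) : List (List Int) :=
  let vals := lines.map pvConv
  ((PySem.List.enumerate vals).foldl (pvStepB vals) ([], 0)).1

-- ===== PRECONDITION & SPEC =====
-- exactly where Python A returns: every non-blank line parses as an int (else int() raises ValueError)
def Pre_make_bags (lines : List String) : Prop :=
  ∀ s ∈ lines, pvBlank s = false → (PySem.Int.ofStr? s).isSome = true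
instance (lines : List String) : Decidable (Pre_make_bags lines) := by
  unfold Pre_make_bags; infer_instance

def pvWitness_make_bags : List String := ["1", "2", "", " 7 ", "\n", "-3"]

def Spec_make_bags (lines : List String) (out : List (List Int)) : Prop := out = make_bags_alt lines
instance (lines : List String) (out : List (List Int)) : Decidable (Spec_make_bags lines out) := by unfold Spec_make_bags; infer_instance

-- ===== CLAIM (what is proved, stated in full; the proofs are below) =====
def Claim_equal_make_bags : Prop := ∀ (lines : List String), Dom_make_bags lines → Pre_make_bags lines → Spec_make_bags lines (make_bags lines)

-- ===== LEMMAS AND PROOFS =====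

-- common specification: the list of bags over the parsed lines, built front-to-back without an accumulator
def pvOS : List (Option Int) → List (List Int)
  | [] => []
  | none :: t => [] :: pvOS t
  | some n :: t =>
      match pvOS t with
      | [] => []
      | b :: bs => (n :: b) :: bs

theorem pvGoA_append (xs : List String) : ∀ (res : List (List Int)) (bag : List Int),
    pvGoA xs res bag = res ++ pvGoA xs [] bag := by
  induction xs with
  | nil => intro res bag; simp [pvGoA]
  | cons x t ih =>
      intro res bag
      by_cases hx : pvBlank x = true
      · simp only [pvGoA, hx, if_pos]
        rw [ih (res ++ [bag]) [], ih ([] ++ [bag]) []]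
        simp
      · simp only [pvGoA, hx, if_neg, Bool.not_eq_true]
        exact ih res (bag ++ [pvToInt x])

theorem pvGoA_eq_pvOS (xs : List String) : ∀ (bag : List Int),
    pvGoA xs [] bag = match pvOS (xs.map pvConv) with
      | [] => []
      | b :: bs => (bag ++ b) :: bs := by
  induction xs with
  | nil => intro bag; simp [pvGoA, pvOS]
  | cons x t ih =>
      intro bag
      by_cases hx : pvBlank x = true
      · simp only [pvGoA, List.map_cons, pvConv, pvOS, hx, if_pos, List.nil_append]
        rw [pvGoA_append t [bag] [], ih []]
        cases h : pvOS (t.map pvConv) <;> simp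
      · simp only [pvGoA, List.map_cons, pvConv, pvOS, hx, if_neg, Bool.not_eq_true]
        rw [ih (bag ++ [pvToInt x])]
        cases h : pvOS (t.map pvConv) <;> simp

theorem make_bags_eq_pvOS (lines : List String) :
    make_bags lines = pvOS (lines.map pvConv) := by
  unfold make_bags
  rw [pvGoA_eq_pvOS]
  cases h : pvOS (lines.map pvConv) <;> simp

theorem pvOS_all_some (vs : List (Option Int)) (h : ∀ v ∈ vs, v.isSome = true) :
    pvOS vs = [] := by
  induction vs with
  | nil => rfl
  | cons v t ih =>
      have ht : pvOS t = [] := ih (fun w hw => h w (by simp [hw]))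
      cases v with
      | none => exact absurd (h none (by simp)) (by simp)
      | some n => simp [pvOS, ht]

theorem pvOS_append_none (t : List (Option Int)) : ∀ (pend : List (Option Int)),
    (∀ v ∈ pend, v.isSome = true) →
    pvOS (pend ++ none :: t) = pend.filterMap id :: pvOS t := by
  intro pend
  induction pend with
  | nil => intro _; simp [pvOS]
  | cons v ps ih =>
      intro h
      cases v with
      | none => exact absurd (h none (by simp)) (by simp)
      | some n =>
          have := ih (fun w hw => h w (by simp [hw]))
          simp only [List.cons_append, pvOS, this, List.filterMap_cons, id]

-- loop invariant of Source B's splitting loop: vals = pre ++ vs, the loop is about to read index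
-- pre.length, and start points just past the last separator (everything in pre.drop c is a parsed int)
theorem pvFoldB_eq_pvOS (vs : List (Option Int)) :
    ∀ (pre : List (Option Int)) (bags : List (List Int)) (c : Nat),
    c ≤ pre.length → (∀ v ∈ pre.drop c, v.isSome = true) →
    ((PySem.List.enumerate vs (pre.length : Int)).foldl (pvStepB (pre ++ vs)) (bags, (c : Int))).1
      = bags ++ pvOS (pre.drop c ++ vs) := by
  induction vs with
  | nil =>
      intro pre bags c _ hpend
      rw [PySem.List.enumerate_nil]
      simp [pvOS_all_some _ (by simpa using hpend)]
  | cons v vs' ih =>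
      intro pre bags c hc hpend
      rw [PySem.List.enumerate_cons, List.foldl_cons]
      cases v with
      | some n =>
          have hstep : pvStepB (pre ++ some n :: vs') (bags, (c : Int)) ((pre.length : Int), some n)
              = (bags, (c : Int)) := rfl
          rw [hstep]
          have hcast : ((pre.length : Int) + 1) = (((pre ++ [some n]).length : Nat) : Int) := by
            simp
          have happ : pre ++ some n :: vs' = (pre ++ [some n]) ++ vs' := by simp
          rw [hcast, happ, ih (pre ++ [some n]) bags c (by simp; omega) ?_]
          · rw [List.drop_append_of_le_length hc]
            simp
          · rw [List.drop_append_of_le_length hc]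
            intro w hw
            rcases List.mem_append.mp hw with h | h
            · exact hpend w h
            · simp at h; simp [h]
      | none =>
          have hslice : (PySem.List.slice (pre ++ none :: vs') (some (c : Int)) (some (pre.length : Int))).filterMap id
              = (pre.drop c).filterMap id := by
            rw [PySem.List.slice_natCast, List.drop_append_of_le_length hc,
                List.take_left' (by simp [List.length_drop])]
          have hstep : pvStepB (pre ++ none :: vs') (bags, (c : Int)) ((pre.length : Int), none)
              = (bags ++ [(pre.drop c).filterMap id], (pre.length : Int) + 1) := by
            simp only [pvStepB, hslice]
          rw [hstep]
          have hcast : ((pre.length : Int) + 1) = (((pre ++ [none]).length : Nat) : Int) := by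
            simp
          have happ : pre ++ none :: vs' = (pre ++ [none]) ++ vs' := by simp
          have hih := ih (pre ++ [none]) (bags ++ [(pre.drop c).filterMap id])
            ((pre ++ [none]).length) (le_refl _) (by simp)
          rw [hcast, happ, hih]
          rw [List.drop_length, pvOS_append_none vs' (pre.drop c) hpend]
          simp

theorem make_bags_alt_eq_pvOS (lines : List String) :
    make_bags_alt lines = pvOS (lines.map pvConv) := by
  unfold make_bags_alt
  have := pvFoldB_eq_pvOS (lines.map pvConv) [] [] 0 (by simp) (by simp)
  simpa using this

-- ===== VERDICT (by name: the statement is the Claim_ definition above) =====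
theorem make_bags_spec : Claim_equal_make_bags := by
  intro lines _ _
  unfold Spec_make_bags
  rw [make_bags_eq_pvOS, make_bags_alt_eq_pvOS]
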